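-- pv_equiv track=rewrite | github.com/goaziz/leetcode | Easy/are_almost_equal_1790.py | areAlmostEqual2
-- ===== SOURCE A (Python) =====
-- def areAlmostEqual2(s1: str, s2: str) -> bool:
--
--     if len(s1) != len(s2):
--         return False
--
--     mismatches = [(a, b) for a, b in zip(s1, s2) if a != b]
--
--     n = len(mismatches)
--     if n == 0:
--         return True
--
--     return n == 2 and mismatches[0] == mismatches[1][::-1]
-- ===== SOURCE B (Python) =====
-- def areAlmostEqual2(s1: str, s2: str) -> bool:
--     # Anagram check via sorting, then count mismatched positions.
--     if sorted(s1) != sorted(s2):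
--         return False
--     diff = sum(1 for a, b in zip(s1, s2) if a != b)
--     return diff == 0 or diff == 2
-- ===== Notes on version B (the rewrite author's own statement) =====
-- stated objective: idiomatic
-- what changed: Replaces collecting the mismatch pairs and checking that the two pairs mirror each other with an anagram test (sorted(s1) == sorted(s2), which also subsumes the length guard) plus a count of differing positions that must be 0 or 2.
import Mathlib
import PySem

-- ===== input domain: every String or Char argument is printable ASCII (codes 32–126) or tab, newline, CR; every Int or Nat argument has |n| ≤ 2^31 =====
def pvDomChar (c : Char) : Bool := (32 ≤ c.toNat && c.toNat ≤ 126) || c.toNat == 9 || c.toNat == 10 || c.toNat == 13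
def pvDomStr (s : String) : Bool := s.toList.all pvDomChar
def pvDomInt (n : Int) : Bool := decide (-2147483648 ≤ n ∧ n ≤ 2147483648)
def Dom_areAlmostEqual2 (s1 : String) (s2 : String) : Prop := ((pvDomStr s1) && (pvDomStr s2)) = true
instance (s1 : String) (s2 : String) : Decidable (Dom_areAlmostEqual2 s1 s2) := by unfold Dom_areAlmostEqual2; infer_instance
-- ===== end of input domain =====

-- B replaces A's mismatch-pair mirroring check by "sorted(s1) == sorted(s2) and the number of
-- differing positions is 0 or 2" (idiomatic alternative; the anagram test subsumes the length guard).

-- ===== PORT A =====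
def areAlmostEqual2 (s1 : String) (s2 : String) : Bool :=
  if s1.toList.length ≠ s2.toList.length then false
  else
    let mismatches := (s1.toList.zip s2.toList).filter (fun p => decide (p.1 ≠ p.2))
    let n := mismatches.length
    if n = 0 then true
    else
      decide (n = 2) &&
        decide (PySem.List.pyGet? mismatches 0 =
                (PySem.List.pyGet? mismatches 1).map (fun p => (p.2, p.1)))

-- ===== PORT B =====
def areAlmostEqual2_alt (s1 : String) (s2 : String) : Bool :=
  if PySem.List.sorted s1.toList (fun x => x) false ≠
     PySem.List.sorted s2.toList (fun x => x) false then false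
  else
    let diff : Int :=
      (s1.toList.zip s2.toList).foldl
        (fun acc p => if decide (p.1 ≠ p.2) then acc + 1 else acc) 0
    decide (diff = 0) || decide (diff = 2)

-- ===== PRECONDITION & SPEC =====
def Spec_areAlmostEqual2 (s1 : String) (s2 : String) (out : Bool) : Prop := out = areAlmostEqual2_alt s1 s2
instance (s1 : String) (s2 : String) (out : Bool) : Decidable (Spec_areAlmostEqual2 s1 s2 out) := by unfold Spec_areAlmostEqual2; infer_instance

-- ===== CLAIM (what is proved, stated in full; the proofs are below) =====
def Claim_equal_areAlmostEqual2 : Prop := ∀ (s1 : String) (s2 : String), Dom_areAlmostEqual2 s1 s2 → Spec_areAlmostEqual2 s1 s2 (areAlmostEqual2 s1 s2)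

-- ===== LEMMAS AND PROOFS =====

-- B's counting fold equals (as an Int) the length of A's mismatch filter.
theorem foldl_count_eq_filter_length (z : List (Char × Char)) (acc : Int) :
    z.foldl (fun acc p => if decide (p.1 ≠ p.2) then acc + 1 else acc) acc
      = acc + (((z.filter (fun p => decide (p.1 ≠ p.2))).length : Int)) := by
  induction z generalizing acc with
  | nil => simp
  | cons h t ih =>
    rw [List.foldl_cons, List.filter_cons]
    by_cases hp : h.1 = h.2
    · rw [if_neg (by simp [hp]), if_neg (by simp [hp])]
      exact ih acc
    · rw [if_pos (by simp [hp]), if_pos (by simp [hp]), ih (acc + 1), List.length_cons]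
      push_cast
      ring

-- the column-perm of a zip reduces to the column-perm of its mismatched pairs
theorem perm_iff_mismatch_perm (z : List (Char × Char)) :
    (z.map Prod.fst).Perm (z.map Prod.snd) ↔
    ((z.filter (fun p => decide (p.1 ≠ p.2))).map Prod.fst).Perm
      ((z.filter (fun p => decide (p.1 ≠ p.2))).map Prod.snd) := by
  have hsplit := List.filter_append_perm (fun p : Char × Char => decide (p.1 ≠ p.2)) z
  have heq : (z.filter (fun p : Char × Char => !decide (p.1 ≠ p.2))).map Prod.fst
      = (z.filter (fun p : Char × Char => !decide (p.1 ≠ p.2))).map Prod.snd := by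
    refine List.map_congr_left (fun a ha => ?_)
    have := (List.mem_filter.mp ha).2
    simpa using this
  have h1 : (z.map Prod.fst).Perm
      ((z.filter (fun p => decide (p.1 ≠ p.2))).map Prod.fst ++
       (z.filter (fun p : Char × Char => !decide (p.1 ≠ p.2))).map Prod.fst) := by
    simpa [List.map_append] using (hsplit.map Prod.fst).symm
  have h2 : (z.map Prod.snd).Perm
      ((z.filter (fun p => decide (p.1 ≠ p.2))).map Prod.snd ++
       (z.filter (fun p : Char × Char => !decide (p.1 ≠ p.2))).map Prod.snd) := by
    simpa [List.map_append] using (hsplit.map Prod.snd).symm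
  constructor
  · intro h
    have := (h1.symm.trans h).trans h2
    rw [heq] at this
    exact (List.perm_append_right_iff _).mp this
  · intro h
    refine h1.trans (((h.append_right _).trans ?_).trans h2.symm)
    rw [heq]

theorem perm_pair (a b c d : Char) :
    [a, c].Perm [b, d] ↔ (a = b ∧ c = d) ∨ (a = d ∧ c = b) := by
  constructor
  · intro h
    have ha : a = b ∨ a = d := by simpa using h.mem_iff.mp (by simp)
    rcases ha with rfl | rfl
    · exact Or.inl ⟨rfl, by simpa using (List.perm_cons a).mp h⟩
    · refine Or.inr ⟨rfl, ?_⟩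
      have h2 : [a, c].Perm [a, b] := h.trans (List.Perm.swap a b [])
      simpa using (List.perm_cons a).mp h2
  · rintro (⟨rfl, rfl⟩ | ⟨rfl, rfl⟩)
    · exact List.Perm.refl _
    · exact List.Perm.swap c a []

-- core equivalence on the underlying character lists
theorem core_equiv (s1 s2 : String) : areAlmostEqual2 s1 s2 = areAlmostEqual2_alt s1 s2 := by
  unfold areAlmostEqual2 areAlmostEqual2_alt
  set l1 := s1.toList with hl1
  set l2 := s2.toList with hl2
  set z := l1.zip l2 with hz
  set m := z.filter (fun p => decide (p.1 ≠ p.2)) with hm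
  have hdiff : z.foldl (fun acc p => if decide (p.1 ≠ p.2) then acc + 1 else acc) (0 : Int)
      = (m.length : Int) := by
    have h := foldl_count_eq_filter_length z 0
    rwa [zero_add] at h
  have hsorted : (PySem.List.sorted l1 (fun x => x) false =
      PySem.List.sorted l2 (fun x => x) false) ↔ l1.Perm l2 :=
    PySem.List.sorted_id_eq_sorted_id_iff_perm l1 l2
  by_cases hlen : l1.length = l2.length
  · -- equal lengths
    have hfst : z.map Prod.fst = l1 := List.map_fst_zip (le_of_eq hlen)
    have hsnd : z.map Prod.snd = l2 := List.map_snd_zip (le_of_eq hlen.symm)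
    have hperm : l1.Perm l2 ↔ (m.map Prod.fst).Perm (m.map Prod.snd) := by
      rw [← hfst, ← hsnd]; exact perm_iff_mismatch_perm z
    simp only [hlen, ne_eq, not_true_eq_false, if_false, ite_not]
    rw [hdiff]
    by_cases hn0 : m.length = 0
    · -- no mismatches: the lists are equal
      have hl : l1 = l2 := by
        rw [← hfst, ← hsnd]
        refine List.map_congr_left (fun a ha => ?_)
        have := List.filter_eq_nil_iff.mp (List.length_eq_zero_iff.mp hn0) a ha
        simpa using this
      simp [hl, hn0]
    · have hi0 : ¬ ((m.length : Int) = 0) := by exact_mod_cast hn0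
      by_cases hn2 : m.length = 2
      · obtain ⟨p, q, hpq⟩ := List.length_eq_two.mp hn2
        have hp : decide (p.1 ≠ p.2) = true := by
          have : p ∈ m := by rw [hpq]; simp
          exact (List.mem_filter.mp this).2
        have hq : decide (q.1 ≠ q.2) = true := by
          have : q ∈ m := by rw [hpq]; simp
          exact (List.mem_filter.mp this).2
        have hp' : p.1 ≠ p.2 := by simpa using hp
        have hq' : q.1 ≠ q.2 := by simpa using hq
        have hiff : l1.Perm l2 ↔ p = (q.2, q.1) := by
          rw [hperm, hpq]
          simp only [List.map_cons, List.map_nil]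
          rw [perm_pair]
          constructor
          · rintro (⟨h1, h2⟩ | ⟨h1, h2⟩)
            · exact absurd h1 hp'
            · exact Prod.ext h1 h2.symm
          · intro h
            exact Or.inr ⟨congrArg Prod.fst h, (congrArg Prod.snd h).symm⟩
        by_cases hsc : PySem.List.sorted l1 (fun x => x) false =
            PySem.List.sorted l2 (fun x => x) false
        · have hpq2 : p = (q.2, q.1) := hiff.mp (hsorted.mp hsc)
          simp [hpq, hsc, PySem.List.pyGet?, PySem.List.pyIdx?, hpq2]
        · have hpq2 : ¬ p = (q.2, q.1) := fun h => hsc (hsorted.mpr (hiff.mpr h))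
          simp [hpq, hsc, PySem.List.pyGet?, PySem.List.pyIdx?]
          exact hpq2
      · have hi2 : ¬ ((m.length : Int) = 2) := by exact_mod_cast hn2
        simp [hn2, hi2]
        intro h
        exact absurd (by rw [h]; rfl : m.length = 0) hn0
  · -- unequal lengths: A is false; sorted lists cannot be equal either
    have hns : ¬ (PySem.List.sorted l1 (fun x => x) false =
        PySem.List.sorted l2 (fun x => x) false) := by
      intro h
      exact hlen ((hsorted.mp h).length_eq)
    simp [hlen, hns]

-- ===== VERDICT (by name: the statement is the Claim_ definition above) =====
theorem areAlmostEqual2_spec : Claim_equal_areAlmostEqual2 := by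
  intro s1 s2 _
  unfold Spec_areAlmostEqual2
  exact core_equiv s1 s2
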